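-- pv_equiv track=rewrite | github.com/Onyx39/Data-Science-Project-Web-Scraping | src/WebScraping-Hôtipaux.py | creer_liste_numero_depatemennt
-- ===== SOURCE A (Python) =====
-- def trouver_liste_nombre_dans_string(s) :
--     candidat = ""
--     for i in range (0, len(s) - 5) :
--         a = 0
--         for j in range(0, 5) :
--             if s[i+j] == '0' or s[i+j] == '1' or s[i+j] == '2' or s[i+j] == '3' or s[i+j] == '4' or s[i+j] == '5' or s[i+j] == '6' or s[i+j] == '7' or s[i+j] == '8' or s[i+j] == '9' :
--                 a+=1
--         if a == 5 :
--             candidat = s[i] + s[i+1] + s[i+2] + s[i+3] + s[i+4]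
--     if candidat != "" :
--         return candidat
--     else :
--         for i in range (0, len(s) - 5) :
--             a = 0
--             for j in range(0, 5) :
--                 if s[i+j] == '0' or s[i+j] == '1' or s[i+j] == '2' or s[i+j] == '3' or s[i+j] == '4' or s[i+j] == '5' or s[i+j] == '6' or s[i+j] == '7' or s[i+j] == '8' or s[i+j] == '9' or s[i+j] == ' ':
--                     a+=1
--             if a == 5 :
--                 candidat = s[i] + s[i+1] + s[i+2] + s[i+3] + s[i+4]
--         return candidat
--
-- def creer_liste_numero_depatemennt (liste_adresse) :
--     departement = []
--     for i in liste_adresse :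
--         cp = trouver_liste_nombre_dans_string(i)
--         if cp != "" :
--             if cp[0] == '9' and cp[1] == '7' :
--                 departement.append(cp[0] + cp[1] + cp[2])
--             else : departement.append(cp[0] + cp[1])
--         else : departement.append("Pas de departement")
--     return departement
-- ===== SOURCE B (Python) =====
-- def trouver_liste_nombre_dans_string(s):
--     last_digit = ""
--     last_digitspace = ""
--     for i in range(0, len(s) - 5):
--         w = s[i:i+5]
--         if all(c in '0123456789' for c in w):
--             last_digit = w
--         if all(c in '0123456789 ' for c in w):
--             last_digitspace = w
--     return last_digit if last_digit != "" else last_digitspace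
--
--
-- def _departement(cp):
--     if cp == "":
--         return "Pas de departement"
--     if cp.startswith("97"):
--         return cp[:3]
--     return cp[:2]
--
--
-- def creer_liste_numero_depatemennt(liste_adresse):
--     return [_departement(trouver_liste_nombre_dans_string(adresse))
--             for adresse in liste_adresse]
-- ===== Notes on version B (the rewrite author's own statement) =====
-- stated objective: simpler
-- what changed: The helper's two sequential window scans (manual per-window digit counter, a == 5) are replaced by one pass over window starts maintaining the last all-digit and last digit-or-space window at once, and the main loop becomes a comprehension over a small classifier using startswith/slicing.
import Mathlib
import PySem

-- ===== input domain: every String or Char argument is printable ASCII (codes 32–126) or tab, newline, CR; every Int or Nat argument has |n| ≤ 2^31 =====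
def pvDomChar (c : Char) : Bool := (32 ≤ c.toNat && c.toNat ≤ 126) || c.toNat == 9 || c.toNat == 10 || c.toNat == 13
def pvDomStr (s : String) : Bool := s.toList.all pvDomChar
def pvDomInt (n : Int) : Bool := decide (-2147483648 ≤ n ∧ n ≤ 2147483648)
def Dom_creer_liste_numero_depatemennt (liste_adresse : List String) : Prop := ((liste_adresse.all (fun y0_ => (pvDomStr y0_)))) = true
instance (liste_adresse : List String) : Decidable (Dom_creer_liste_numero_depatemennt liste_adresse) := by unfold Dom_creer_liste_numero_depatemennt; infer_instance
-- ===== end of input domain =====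

-- B replaces the helper's two sequential window scans (manual digit counter, a == 5) by a single
-- pass that keeps the last all-digit and last digit-or-space window at once, and the main loop by
-- a comprehension over a small classifier; objective: simpler.

-- ===== PORT A =====
-- the literal or-chain of A's inner digit test
def pvDigitA (c : Char) : Bool :=
  c == '0' || c == '1' || c == '2' || c == '3' || c == '4' ||
  c == '5' || c == '6' || c == '7' || c == '8' || c == '9'

-- the second loop's test (same chain plus ' ')
def pvDigitSpaceA (c : Char) : Bool :=
  c == '0' || c == '1' || c == '2' || c == '3' || c == '4' ||
  c == '5' || c == '6' || c == '7' || c == '8' || c == '9' || c == ' '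

-- port of trouver_liste_nombre_dans_string; all indices i+j lie in range, so pyGetD's default is never used
def trouver_A (s : String) : String :=
  let cs := s.toList
  let candidat : String :=
    (PySem.List.pyRange 0 ((cs.length : Int) - 5) 1).foldl (fun cand i =>
      let a : Int := (PySem.List.pyRange 0 5 1).foldl (fun a j =>
        if pvDigitA (PySem.List.pyGetD cs (i + j) ' ') then a + 1 else a) 0
      if a == 5 then
        String.ofList [PySem.List.pyGetD cs i ' ', PySem.List.pyGetD cs (i+1) ' ',
                   PySem.List.pyGetD cs (i+2) ' ', PySem.List.pyGetD cs (i+3) ' ',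
                   PySem.List.pyGetD cs (i+4) ' ']
      else cand) ""
  if candidat != "" then candidat
  else
    (PySem.List.pyRange 0 ((cs.length : Int) - 5) 1).foldl (fun cand i =>
      let a : Int := (PySem.List.pyRange 0 5 1).foldl (fun a j =>
        if pvDigitSpaceA (PySem.List.pyGetD cs (i + j) ' ') then a + 1 else a) 0
      if a == 5 then
        String.ofList [PySem.List.pyGetD cs i ' ', PySem.List.pyGetD cs (i+1) ' ',
                   PySem.List.pyGetD cs (i+2) ' ', PySem.List.pyGetD cs (i+3) ' ',
                   PySem.List.pyGetD cs (i+4) ' ']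
      else cand) candidat

def creer_liste_numero_depatemennt (liste_adresse : List String) : List String :=
  liste_adresse.foldl (fun departement i =>
    let cp := trouver_A i
    if cp != "" then
      if PySem.List.pyGetD cp.toList 0 ' ' == '9' && PySem.List.pyGetD cp.toList 1 ' ' == '7' then
        departement ++ [String.ofList [PySem.List.pyGetD cp.toList 0 ' ', PySem.List.pyGetD cp.toList 1 ' ',
                                   PySem.List.pyGetD cp.toList 2 ' ']]
      else
        departement ++ [String.ofList [PySem.List.pyGetD cp.toList 0 ' ', PySem.List.pyGetD cp.toList 1 ' ']]
    else departement ++ ["Pas de departement"]) []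

-- ===== PORT B =====
-- port of Source B's trouver_liste_nombre_dans_string: one pass, two last-match accumulators
def trouver_B (s : String) : String :=
  let cs := s.toList
  let p :=
    (PySem.List.pyRange 0 ((cs.length : Int) - 5) 1).foldl
      (fun (p : String × String) i =>
        let w := PySem.List.slice cs (some i) (some (i + 5))
        ((if w.all (fun c => (['0','1','2','3','4','5','6','7','8','9'] : List Char).contains c)
          then String.ofList w else p.1),
         (if w.all (fun c => (['0','1','2','3','4','5','6','7','8','9',' '] : List Char).contains c)
          then String.ofList w else p.2)))
      ("", "")
  if p.1 != "" then p.1 else p.2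

-- port of Source B's _departement
def pvDepartement (cp : String) : String :=
  if cp == "" then "Pas de departement"
  else if PySem.Str.startswith cp "97" then String.ofList (PySem.List.slice cp.toList none (some 3))
  else String.ofList (PySem.List.slice cp.toList none (some 2))

def creer_liste_numero_depatemennt_alt (liste_adresse : List String) : List String :=
  liste_adresse.map (fun adresse => pvDepartement (trouver_B adresse))

-- ===== PRECONDITION & SPEC =====
def Spec_creer_liste_numero_depatemennt (liste_adresse : List String) (out : List String) : Prop := out = creer_liste_numero_depatemennt_alt liste_adresse
instance (liste_adresse : List String) (out : List String) : Decidable (Spec_creer_liste_numero_depatemennt liste_adresse out) := by unfold Spec_creer_liste_numero_depatemennt; infer_instance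

-- ===== CLAIM (what is proved, stated in full; the proofs are below) =====
def Claim_equal_creer_liste_numero_depatemennt : Prop := ∀ (liste_adresse : List String), Dom_creer_liste_numero_depatemennt liste_adresse → Spec_creer_liste_numero_depatemennt liste_adresse (creer_liste_numero_depatemennt liste_adresse)

-- ===== LEMMAS AND PROOFS =====

lemma window5 (cs : List Char) (k : Nat) (h : k + 5 ≤ cs.length) :
    (cs.drop k).take 5 = [cs.getD k ' ', cs.getD (k+1) ' ', cs.getD (k+2) ' ', cs.getD (k+3) ' ', cs.getD (k+4) ' '] := by
  rw [List.drop_eq_getElem_cons (by omega), List.drop_eq_getElem_cons (l := cs) (by omega : k+1 < cs.length),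
      List.drop_eq_getElem_cons (l := cs) (by omega : k+1+1 < cs.length),
      List.drop_eq_getElem_cons (l := cs) (by omega : k+1+1+1 < cs.length),
      List.drop_eq_getElem_cons (l := cs) (by omega : k+1+1+1+1 < cs.length)]
  simp only [List.take, List.getD]
  rw [List.getElem?_eq_getElem (by omega : k < cs.length), List.getElem?_eq_getElem (by omega : k+1 < cs.length),
      List.getElem?_eq_getElem (by omega : k+2 < cs.length), List.getElem?_eq_getElem (by omega : k+3 < cs.length),
      List.getElem?_eq_getElem (by omega : k+4 < cs.length)]
  rfl

lemma contains_digit (c : Char) :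
    (['0','1','2','3','4','5','6','7','8','9'] : List Char).contains c = pvDigitA c := by
  simp only [List.contains_cons, List.contains_nil, Bool.or_false, pvDigitA]
  ac_rfl

lemma contains_digit_space (c : Char) :
    (['0','1','2','3','4','5','6','7','8','9',' '] : List Char).contains c = pvDigitSpaceA c := by
  simp only [List.contains_cons, List.contains_nil, Bool.or_false, pvDigitSpaceA]
  ac_rfl

-- A's window test (the counter a reaching 5) agrees with B's all-of-window test, window for window
lemma step_eq (cs allowed : List Char) (test : Char → Bool)
    (htest : ∀ c, allowed.contains c = test c)
    (i : Int) (hi : 0 ≤ i) (hlt : i < (cs.length : Int) - 5) (cand : String) :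
    (if (((PySem.List.pyRange 0 5 1).foldl (fun a j => if test (PySem.List.pyGetD cs (i + j) ' ') then a + 1 else a) (0:Int)) == 5)
     then String.ofList [PySem.List.pyGetD cs i ' ', PySem.List.pyGetD cs (i+1) ' ', PySem.List.pyGetD cs (i+2) ' ',
                         PySem.List.pyGetD cs (i+3) ' ', PySem.List.pyGetD cs (i+4) ' ']
     else cand)
    = (if (PySem.List.slice cs (some i) (some (i + 5))).all (fun c => allowed.contains c)
       then String.ofList (PySem.List.slice cs (some i) (some (i + 5))) else cand) := by
  obtain ⟨k, rfl⟩ : ∃ k : Nat, i = (k : Int) := ⟨i.toNat, (Int.toNat_of_nonneg hi).symm⟩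
  have hk : k + 5 ≤ cs.length := by omega
  have hslice : PySem.List.slice cs (some (k:Int)) (some ((k:Int)+5)) = (cs.drop k).take 5 := by
    have h5 : ((k:Int)+5) = (((k+5 : Nat)):Int) := by push_cast; ring
    rw [h5, PySem.List.slice_natCast]
    norm_num
  rw [hslice, window5 cs k hk]
  have hr : PySem.List.pyRange 0 5 1 = [0,1,2,3,4] := by decide
  rw [hr]
  have e0 : (k:Int) + 0 = ((k:Nat):Int) := by ring
  have e1 : (k:Int) + 1 = (((k+1):Nat):Int) := by push_cast; ring
  have e2 : (k:Int) + 2 = (((k+2):Nat):Int) := by push_cast; ring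
  have e3 : (k:Int) + 3 = (((k+3):Nat):Int) := by push_cast; ring
  have e4 : (k:Int) + 4 = (((k+4):Nat):Int) := by push_cast; ring
  simp only [List.foldl, List.all_cons, List.all_nil, htest, e0, e1, e2, e3, e4,
             PySem.List.pyGetD_natCast]
  generalize test (cs.getD k ' ') = d0
  generalize test (cs.getD (k+1) ' ') = d1
  generalize test (cs.getD (k+2) ' ') = d2
  generalize test (cs.getD (k+3) ' ') = d3
  generalize test (cs.getD (k+4) ' ') = d4
  rcases d0 <;> rcases d1 <;> rcases d2 <;> rcases d3 <;> rcases d4 <;> norm_num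

lemma trouver_eq (s : String) : trouver_A s = trouver_B s := by
  unfold trouver_A trouver_B
  dsimp only
  rw [PySem.List.foldl_prod_mk
      (f := fun cand i =>
        if (PySem.List.slice s.toList (some i) (some (i + 5))).all
            (fun c => (['0','1','2','3','4','5','6','7','8','9'] : List Char).contains c)
        then String.ofList (PySem.List.slice s.toList (some i) (some (i + 5))) else cand)
      (g := fun cand i =>
        if (PySem.List.slice s.toList (some i) (some (i + 5))).all
            (fun c => (['0','1','2','3','4','5','6','7','8','9',' '] : List Char).contains c)
        then String.ofList (PySem.List.slice s.toList (some i) (some (i + 5))) else cand)]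
  have h1 := PySem.List.foldl_congr_mem
      (l := PySem.List.pyRange 0 ((s.toList.length : Int) - 5) 1) (init := ("" : String))
      (f := fun cand i =>
        let a : Int := (PySem.List.pyRange 0 5 1).foldl (fun a j =>
          if pvDigitA (PySem.List.pyGetD s.toList (i + j) ' ') then a + 1 else a) 0
        if a == 5 then
          String.ofList [PySem.List.pyGetD s.toList i ' ', PySem.List.pyGetD s.toList (i+1) ' ',
                     PySem.List.pyGetD s.toList (i+2) ' ', PySem.List.pyGetD s.toList (i+3) ' ',
                     PySem.List.pyGetD s.toList (i+4) ' ']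
        else cand)
      (g := fun cand i =>
        if (PySem.List.slice s.toList (some i) (some (i + 5))).all
            (fun c => (['0','1','2','3','4','5','6','7','8','9'] : List Char).contains c)
        then String.ofList (PySem.List.slice s.toList (some i) (some (i + 5))) else cand)
      (by intro acc x hx
          rw [PySem.List.mem_pyRange_one] at hx
          exact step_eq s.toList _ pvDigitA contains_digit x hx.1 hx.2 acc)
  rw [h1]
  have h2 := PySem.List.foldl_congr_mem
      (l := PySem.List.pyRange 0 ((s.toList.length : Int) - 5) 1) (init := ("" : String))
      (f := fun cand i =>
        let a : Int := (PySem.List.pyRange 0 5 1).foldl (fun a j =>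
          if pvDigitSpaceA (PySem.List.pyGetD s.toList (i + j) ' ') then a + 1 else a) 0
        if a == 5 then
          String.ofList [PySem.List.pyGetD s.toList i ' ', PySem.List.pyGetD s.toList (i+1) ' ',
                     PySem.List.pyGetD s.toList (i+2) ' ', PySem.List.pyGetD s.toList (i+3) ' ',
                     PySem.List.pyGetD s.toList (i+4) ' ']
        else cand)
      (g := fun cand i =>
        if (PySem.List.slice s.toList (some i) (some (i + 5))).all
            (fun c => (['0','1','2','3','4','5','6','7','8','9',' '] : List Char).contains c)
        then String.ofList (PySem.List.slice s.toList (some i) (some (i + 5))) else cand)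
      (by intro acc x hx
          rw [PySem.List.mem_pyRange_one] at hx
          exact step_eq s.toList _ pvDigitSpaceA contains_digit_space x hx.1 hx.2 acc)
  split_ifs with hcond
  · rfl
  · simp only [bne_iff_ne, ne_eq, not_not] at hcond
    rw [hcond]
    exact h2

lemma trouver_A_shape (s : String) : trouver_A s = "" ∨ (trouver_A s).toList.length = 5 := by
  unfold trouver_A
  dsimp only
  have hstep : ∀ (test : Char → Bool) (cand : String) (i : Int),
      (cand = "" ∨ cand.toList.length = 5) →
      ((if (((PySem.List.pyRange 0 5 1).foldl (fun a j =>
            if test (PySem.List.pyGetD s.toList (i + j) ' ') then a + 1 else a) (0:Int)) == 5)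
        then String.ofList [PySem.List.pyGetD s.toList i ' ', PySem.List.pyGetD s.toList (i+1) ' ',
                        PySem.List.pyGetD s.toList (i+2) ' ', PySem.List.pyGetD s.toList (i+3) ' ',
                        PySem.List.pyGetD s.toList (i+4) ' ']
        else cand) = "" ∨
       (if (((PySem.List.pyRange 0 5 1).foldl (fun a j =>
            if test (PySem.List.pyGetD s.toList (i + j) ' ') then a + 1 else a) (0:Int)) == 5)
        then String.ofList [PySem.List.pyGetD s.toList i ' ', PySem.List.pyGetD s.toList (i+1) ' ',
                        PySem.List.pyGetD s.toList (i+2) ' ', PySem.List.pyGetD s.toList (i+3) ' ',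
                        PySem.List.pyGetD s.toList (i+4) ' ']
        else cand).toList.length = 5) := by
    intro test cand i h
    split
    · right; simp
    · exact h
  have h1 := List.foldlRecOn (PySem.List.pyRange 0 ((s.toList.length : Int) - 5) 1)
      (fun cand i =>
        let a : Int := (PySem.List.pyRange 0 5 1).foldl (fun a j =>
          if pvDigitA (PySem.List.pyGetD s.toList (i + j) ' ') then a + 1 else a) 0
        if a == 5 then
          String.ofList [PySem.List.pyGetD s.toList i ' ', PySem.List.pyGetD s.toList (i+1) ' ',
                     PySem.List.pyGetD s.toList (i+2) ' ', PySem.List.pyGetD s.toList (i+3) ' ',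
                     PySem.List.pyGetD s.toList (i+4) ' ']
        else cand)
      (motive := fun c => c = "" ∨ c.toList.length = 5)
      (b := ("" : String))
      (Or.inl rfl)
      (fun cand h i _ => hstep pvDigitA cand i h)
  split
  · exact h1
  · exact List.foldlRecOn _ _ (motive := fun c => c = "" ∨ c.toList.length = 5) h1
      (fun cand h i _ => hstep pvDigitSpaceA cand i h)

lemma list_len5 (l : List Char) (h : l.length = 5) :
    ∃ a b c d e, l = [a, b, c, d, e] := by
  rcases l with _ | ⟨a, _ | ⟨b, _ | ⟨c, _ | ⟨d, _ | ⟨e, _ | ⟨f, t⟩⟩⟩⟩⟩⟩ <;> simp_all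

lemma elem_eq (s : String) :
    (let cp := trouver_A s
     if cp != "" then
       if PySem.List.pyGetD cp.toList 0 ' ' == '9' && PySem.List.pyGetD cp.toList 1 ' ' == '7' then
         String.ofList [PySem.List.pyGetD cp.toList 0 ' ', PySem.List.pyGetD cp.toList 1 ' ',
                    PySem.List.pyGetD cp.toList 2 ' ']
       else
         String.ofList [PySem.List.pyGetD cp.toList 0 ' ', PySem.List.pyGetD cp.toList 1 ' ']
     else "Pas de departement") = pvDepartement (trouver_B s) := by
  rw [← trouver_eq]
  rcases trouver_A_shape s with h | h
  · simp [h, pvDepartement]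
  · obtain ⟨a, b, c, d, e, hl⟩ := list_len5 _ h
    have hne : trouver_A s ≠ "" := by
      intro h0
      rw [h0] at hl
      simp at hl
    have h97 : ("97" : String).toList = ['9', '7'] := by decide
    have hsw : PySem.Str.startswith (trouver_A s) "97" = (a == '9' && b == '7') := by
      rw [PySem.Str.startswith_eq, h97, hl, Bool.eq_iff_iff]
      simp only [PySem.Chars.startswith_iff, List.cons_prefix_cons, List.nil_prefix,
                 and_true, Bool.and_eq_true, beq_iff_eq]
      constructor
      · rintro ⟨h9, h7⟩; exact ⟨h9.symm, h7.symm⟩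
      · rintro ⟨h9, h7⟩; exact ⟨h9.symm, h7.symm⟩
    have hbne : (trouver_A s != "") = true := bne_iff_ne.mpr hne
    have hbeq : (trouver_A s == "") = false := by simpa using hne
    simp only [pvDepartement, hl, PySem.List.pyGetD, hsw, hbne, hbeq]
    rw [PySem.List.slice_to _ (b := 3) (by norm_num), PySem.List.slice_to _ (b := 2) (by norm_num)]
    simp

-- ===== VERDICT (by name: the statement is the Claim_ definition above) =====
theorem creer_liste_numero_depatemennt_spec : Claim_equal_creer_liste_numero_depatemennt := by
  intro l _
  unfold Spec_creer_liste_numero_depatemennt creer_liste_numero_depatemennt creer_liste_numero_depatemennt_alt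
  rw [show (fun (departement : List String) (i : String) =>
        let cp := trouver_A i
        if cp != "" then
          if PySem.List.pyGetD cp.toList 0 ' ' == '9' && PySem.List.pyGetD cp.toList 1 ' ' == '7' then
            departement ++ [String.ofList [PySem.List.pyGetD cp.toList 0 ' ', PySem.List.pyGetD cp.toList 1 ' ',
                                       PySem.List.pyGetD cp.toList 2 ' ']]
          else
            departement ++ [String.ofList [PySem.List.pyGetD cp.toList 0 ' ', PySem.List.pyGetD cp.toList 1 ' ']]
        else departement ++ ["Pas de departement"])
      = (fun departement i => departement ++ [pvDepartement (trouver_B i)]) from ?_,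
     PySem.List.foldl_append_singleton_eq_map]
  · simp
  · funext dep x
    rw [← elem_eq x]
    dsimp only
    split <;> first | (split <;> rfl) | rfl
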